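-- pv_equiv track=rewrite | github.com/moyashianji/scrape_retweeters_fast | x_campaign_picker.py | extract_tweet_id
-- ===== SOURCE A (Python) =====
-- def extract_tweet_id(tweet_url_or_id: str) -> str:
--     """ツイートURLまたはIDからIDを抽出"""
--     # URLの場合
--     if "twitter.com" in tweet_url_or_id or "x.com" in tweet_url_or_id:
--         # URLからIDを抽出 (例: https://x.com/user/status/1234567890)
--         parts = tweet_url_or_id.rstrip("/").split("/")
--         for i, part in enumerate(parts):
--             if part == "status" and i + 1 < len(parts):
--                 return parts[i + 1].split("?")[0]
--         raise ValueError(f"無効なツイートURL: {tweet_url_or_id}")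
--     # IDの場合
--     return tweet_url_or_id
-- ===== SOURCE B (Python) =====
-- def extract_tweet_id(tweet_url_or_id: str) -> str:
--     """ツイートURLまたはIDからIDを抽出"""
--     if "twitter.com" in tweet_url_or_id or "x.com" in tweet_url_or_id:
--         trimmed = tweet_url_or_id.rstrip("/")
--         # a segment equal to "status" with a following segment == "/status/" at a
--         # segment boundary of "/" + trimmed; take the first such occurrence
--         k = ("/" + trimmed).find("/status/")
--         if k == -1:
--             raise ValueError(f"無効なツイートURL: {tweet_url_or_id}")
--         tail = trimmed[k + 7:]
--         return tail.split("/")[0].split("?")[0]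
--     return tweet_url_or_id
-- ===== Notes on version B (the rewrite author's own statement) =====
-- stated objective: idiomatic
-- what changed: Replaces A's split-into-segments plus enumerate scan for a 'status' segment with a following segment by a single substring search for "/status/" in "/" + the rstripped input, then slicing out the id.
import Mathlib
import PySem

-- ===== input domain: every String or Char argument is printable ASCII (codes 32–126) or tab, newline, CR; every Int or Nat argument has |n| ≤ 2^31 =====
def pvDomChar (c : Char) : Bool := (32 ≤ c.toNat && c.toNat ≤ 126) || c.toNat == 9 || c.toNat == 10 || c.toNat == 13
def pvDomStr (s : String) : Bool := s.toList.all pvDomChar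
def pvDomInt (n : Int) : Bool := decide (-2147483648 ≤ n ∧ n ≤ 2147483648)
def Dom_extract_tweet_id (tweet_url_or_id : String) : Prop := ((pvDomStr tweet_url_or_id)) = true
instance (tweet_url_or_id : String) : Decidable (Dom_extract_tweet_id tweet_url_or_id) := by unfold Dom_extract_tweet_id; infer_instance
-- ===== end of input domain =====

-- B replaces A's split-and-enumerate segment scan by a single substring search for
-- "/status/" in "/" + rstripped input (idiomatic; same cost class).

-- shared helper: Python's s.rstrip("/") on the character list (PySem has rstrip only
-- for whitespace); exact: drops exactly the trailing '/' characters
def pvRstripSlash (cs : List Char) : List Char :=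
  ((cs.reverse.dropWhile (fun c => c == '/')).reverse)

-- ===== PORT A =====
-- the for-loop over enumerate(parts): returns parts[i+1].split("?")[0] at the first
-- i with parts[i] == "status" and i+1 < len(parts); none = the loop falls through
def pvLoopA : List (List Char) → Option (List Char)
  | [] => none
  | p :: ps =>
    match ps with
    | [] => none
    | q :: _ =>
      if p = "status".toList then some ((PySem.Chars.splitOn q ['?']).headI)
      else pvLoopA ps

def extract_tweet_id (tweet_url_or_id : String) : String :=
  if PySem.Str.isIn "twitter.com" tweet_url_or_id || PySem.Str.isIn "x.com" tweet_url_or_id then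
    let parts := PySem.Chars.splitOn (pvRstripSlash tweet_url_or_id.toList) ['/']
    match pvLoopA parts with
    | some tid => String.mk tid
    | none => tweet_url_or_id   -- Python raises ValueError here; excluded by Pre_
  else tweet_url_or_id

-- ===== PORT B =====
def extract_tweet_id_alt (tweet_url_or_id : String) : String :=
  if PySem.Str.isIn "twitter.com" tweet_url_or_id || PySem.Str.isIn "x.com" tweet_url_or_id then
    let trimmed := pvRstripSlash tweet_url_or_id.toList
    let k := PySem.Chars.find ('/' :: trimmed) "/status/".toList   -- ("/" + trimmed).find("/status/")
    if k = -1 then tweet_url_or_id   -- Python raises ValueError here; excluded by Pre_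
    else
      let tail := PySem.Chars.slice trimmed (some (k + 7)) none    -- trimmed[k+7:]
      String.mk ((PySem.Chars.splitOn ((PySem.Chars.splitOn tail ['/']).headI) ['?']).headI)
  else tweet_url_or_id

-- ===== PRECONDITION & SPEC =====
-- Pre_ excludes exactly the inputs on which A raises ValueError (a twitter.com/x.com
-- URL without a "status" segment followed by another segment); B raises there too.
def Pre_extract_tweet_id (tweet_url_or_id : String) : Prop :=
  (PySem.Str.isIn "twitter.com" tweet_url_or_id || PySem.Str.isIn "x.com" tweet_url_or_id) = false ∨
  PySem.Chars.isIn "/status/".toList ('/' :: pvRstripSlash tweet_url_or_id.toList) = true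
instance (tweet_url_or_id : String) : Decidable (Pre_extract_tweet_id tweet_url_or_id) := by
  unfold Pre_extract_tweet_id; infer_instance

def pvWitness_extract_tweet_id : String := "https://x.com/user/status/1234567890"

def Spec_extract_tweet_id (tweet_url_or_id : String) (out : String) : Prop := out = extract_tweet_id_alt tweet_url_or_id
instance (tweet_url_or_id : String) (out : String) : Decidable (Spec_extract_tweet_id tweet_url_or_id out) := by unfold Spec_extract_tweet_id; infer_instance

-- ===== CLAIM (what is proved, stated in full; the proofs are below) =====
def Claim_equal_extract_tweet_id : Prop := ∀ (tweet_url_or_id : String), Dom_extract_tweet_id tweet_url_or_id → Pre_extract_tweet_id tweet_url_or_id → Spec_extract_tweet_id tweet_url_or_id (extract_tweet_id tweet_url_or_id)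

-- ===== LEMMAS AND PROOFS =====

theorem pvSplitOnGo_eq (c : Char) : ∀ (fuel : Nat) (l cur : List Char) (acc : List (List Char)),
    l.length ≤ fuel →
    PySem.Chars.splitOn.go [c] fuel l cur acc
      = acc.reverse ++ (List.splitOnP (fun x => x == c) l).modifyHead (cur.reverse ++ ·) := by
  intro fuel
  induction fuel with
  | zero =>
    intro l cur acc h
    have : l = [] := List.eq_nil_of_length_eq_zero (Nat.le_zero.mp h)
    subst this
    simp [PySem.Chars.splitOn.go, List.splitOnP_nil]
  | succ n ih =>
    intro l cur acc h
    cases l with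
    | nil => simp [PySem.Chars.splitOn.go, List.splitOnP_nil]
    | cons x rest =>
      by_cases hx : x = c
      · subst hx
        have hpre : [x].isPrefixOf (x :: rest) = true := by simp [List.isPrefixOf]
        rw [PySem.Chars.splitOn.go]
        simp only [hpre, if_true, List.length_cons, List.length_nil, Nat.zero_add,
          List.drop_succ_cons, List.drop_zero] at *
        rw [ih rest [] (cur.reverse :: acc) (by omega)]
        simp [List.splitOnP_cons]
        exact congrFun List.modifyHead_id _
      · have hpre : [c].isPrefixOf (x :: rest) = false := by
          simp [List.isPrefixOf]; exact fun hh => (hx hh.symm).elim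
        rw [PySem.Chars.splitOn.go]
        simp only [hpre, if_false, Bool.false_eq_true] at *
        rw [ih rest (x :: cur) acc (by simp at h; omega)]
        rw [List.splitOnP_cons]
        have : (x == c) = false := by simp [hx]
        simp [this, List.modifyHead_modifyHead]
        rfl

theorem pvSplitOn_single (c : Char) (l : List Char) :
    PySem.Chars.splitOn l [c] = List.splitOnP (fun x => x == c) l := by
  rw [PySem.Chars.splitOn, pvSplitOnGo_eq c (l.length + 1) l [] [] (by omega)]
  simp
  exact congrFun List.modifyHead_id _

theorem pvFindGo_offset (sub : List Char) : ∀ (l : List Char) (k : Nat),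
    PySem.Chars.find.go sub l k
      = if PySem.Chars.find.go sub l 0 = -1 then -1 else (k : Int) + PySem.Chars.find.go sub l 0 := by
  intro l
  induction l with
  | nil =>
    intro k
    by_cases h : sub.isEmpty <;> simp [PySem.Chars.find.go, h]
  | cons x rest ih =>
    intro k
    by_cases h : sub.isPrefixOf (x :: rest)
    · simp [PySem.Chars.find.go, h]
    · rw [PySem.Chars.find.go, PySem.Chars.find.go]
      simp only [h, if_false, Bool.false_eq_true]
      rw [ih (k + 1), ih 1]
      have hg : -1 ≤ PySem.Chars.find.go sub rest 0 := by
        have := PySem.Chars.neg_one_le_find rest sub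
        rwa [PySem.Chars.find] at this
      by_cases h2 : PySem.Chars.find.go sub rest 0 = -1
      · simp [h2]
      · have h3 : (1 : Int) + PySem.Chars.find.go sub rest 0 ≠ -1 := by omega
        simp [h2, h3]
        omega

theorem pvFindGo_nofree : ∀ (u : List Char) (k : Nat), '/' ∉ u →
    PySem.Chars.find.go "/status/".toList u k = -1 := by
  intro u
  induction u with
  | nil => intro k _; simp [PySem.Chars.find.go]
  | cons x rest ih =>
    intro k hu
    have hx : x ≠ '/' := fun h => hu (h ▸ List.mem_cons_self)
    have hpre : ("/status/".toList).isPrefixOf (x :: rest) = false := by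
      have : "/status/".toList = '/' :: "status/".toList := by decide
      rw [this, List.isPrefixOf]
      simp [Ne.symm hx]
    rw [PySem.Chars.find.go]
    simp only [hpre, if_false, Bool.false_eq_true]
    exact ih (k + 1) (fun h => hu (List.mem_cons_of_mem _ h))

theorem pvFindGo_skip : ∀ (u : List Char) (rest : List Char) (k : Nat), '/' ∉ u →
    PySem.Chars.find.go "/status/".toList (u ++ '/' :: rest) k
      = PySem.Chars.find.go "/status/".toList ('/' :: rest) (k + u.length) := by
  intro u
  induction u with
  | nil => intro rest k _; simp
  | cons x rest' ih =>
    intro rest k hu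
    have hx : x ≠ '/' := fun h => hu (h ▸ List.mem_cons_self)
    have hpre : ("/status/".toList).isPrefixOf (x :: (rest' ++ '/' :: rest)) = false := by
      have : "/status/".toList = '/' :: "status/".toList := by decide
      rw [this, List.isPrefixOf]
      simp [Ne.symm hx]
    rw [List.cons_append, PySem.Chars.find.go]
    simp only [hpre, if_false, Bool.false_eq_true]
    rw [ih rest (k + 1) (fun h => hu (List.mem_cons_of_mem _ h))]
    congr 1
    simp
    omega

theorem pvNotPrefix (seg rest : List Char) (hf : '/' ∉ seg) (hs : seg ≠ "status".toList) :
    ¬ ("status/".toList <+: seg ++ '/' :: rest) := by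
  intro h
  have htake : "status/".toList = (seg ++ '/' :: rest).take 7 := by
    have := List.prefix_iff_eq_take.mp h
    simpa using this
  by_cases hlen : 7 ≤ seg.length
  · rw [List.take_append_of_le_length hlen] at htake
    have hmem : '/' ∈ seg.take 7 := by
      rw [← htake]; decide
    exact hf (List.mem_of_mem_take hmem)
  · have hsl : ("status/".toList).take (seg.length + 1) = seg ++ ['/'] := by
      rw [htake, List.take_take, min_eq_left (by omega), List.take_append]
      rw [List.take_of_length_le (by omega)]
      congr 1
      have : seg.length + 1 - seg.length = 1 := by omega
      rw [this]
      rfl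
    by_cases h5 : seg.length ≤ 5
    · have hmem : '/' ∈ ("status/".toList).take (seg.length + 1) := by
        rw [hsl]; simp
      have hpre2 : ("status/".toList).take (seg.length + 1) = ("status".toList).take (seg.length + 1) := by
        have h6 : "status".toList = ("status/".toList).take 6 := by decide
        rw [h6, List.take_take, min_eq_left (by omega)]
      have : '/' ∈ "status".toList := by
        rw [hpre2] at hmem
        exact List.mem_of_mem_take hmem
      exact absurd this (by decide)
    · have h6' : seg.length = 6 := by omega
      rw [h6'] at hsl
      have hfull : seg ++ ['/'] = "status".toList ++ ['/'] := by
        rw [← hsl]; decide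
      exact hs (List.append_cancel_right hfull)

theorem pvSplitOnP_free_append (seg rest : List Char) (hf : ∀ x ∈ seg, (x == '/') = false) :
    List.splitOnP (fun x => x == '/') (seg ++ '/' :: rest)
      = seg :: List.splitOnP (fun x => x == '/') rest := by
  induction seg with
  | nil => simp [List.splitOnP_cons]
  | cons x s ih =>
    have hx := hf x List.mem_cons_self
    rw [List.cons_append, List.splitOnP_cons, hx]
    simp only [Bool.false_eq_true, if_false]
    rw [ih (fun y hy => hf y (List.mem_cons_of_mem _ hy))]
    rfl

theorem pvMain : ∀ (n : Nat) (t : List Char), t.length ≤ n →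
    pvLoopA (List.splitOnP (fun x => x == '/') t)
      = (if PySem.Chars.find ('/' :: t) "/status/".toList = -1 then none
         else some ((PySem.Chars.splitOn
            ((PySem.Chars.splitOn
               (t.drop ((PySem.Chars.find ('/' :: t) "/status/".toList).toNat + 7)) ['/']).headI) ['?']).headI)) := by
  intro n
  induction n with
  | zero =>
    intro t ht
    have : t = [] := List.eq_nil_of_length_eq_zero (Nat.le_zero.mp ht)
    subst this
    decide
  | succ n ih =>
    intro t ht
    by_cases hc : '/' ∈ t
    · -- t = seg ++ '/' :: rest with '/'-free seg
      set f : Char → Bool := fun x => !(x == '/') with hf_def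
      have hdne : t.dropWhile f ≠ [] := by
        intro hnil
        have := List.dropWhile_eq_nil_iff.mp hnil '/' hc
        simp [hf_def] at this
      obtain ⟨c, rest, hd⟩ : ∃ c rest, t.dropWhile f = c :: rest := by
        cases h : t.dropWhile f with
        | nil => exact absurd h hdne
        | cons c rest => exact ⟨c, rest, rfl⟩
      have hchead : c = '/' := by
        have hkey : ∀ (l : List Char) (h : l ≠ []), l = c :: rest → f (l.head h) = false → f c = false := by
          intro l h hl hfl
          subst hl
          simpa using hfl
        have := hkey _ hdne hd (List.head_dropWhile_not f hdne)
        simpa [hf_def] using this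
      subst hchead
      set seg := t.takeWhile f with hseg_def
      have hteq : t = seg ++ '/' :: rest := by
        rw [hseg_def, ← hd, List.takeWhile_append_dropWhile]
      have hfree : ∀ x ∈ seg, (x == '/') = false := by
        intro x hx
        have := List.mem_takeWhile_imp hx
        simpa [hf_def] using this
      have hfree' : '/' ∉ seg := by
        intro hx
        have := hfree '/' hx
        simp at this
      clear_value seg
      have hlen : rest.length ≤ n := by
        rw [hteq] at ht
        simp at ht
        omega
      rw [hteq, pvSplitOnP_free_append seg rest hfree]
      obtain ⟨q, qs, hq⟩ : ∃ q qs, List.splitOnP (fun x => x == '/') rest = q :: qs := by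
        cases h : List.splitOnP (fun x => x == '/') rest with
        | nil => exact absurd h (List.splitOnP_ne_nil _ _)
        | cons q qs => exact ⟨q, qs, rfl⟩
      by_cases hseg : seg = "status".toList
      · subst hseg
        have hfind : PySem.Chars.find ('/' :: ("status".toList ++ '/' :: rest)) "/status/".toList = 0 := by
          rw [PySem.Chars.find, PySem.Chars.find.go]
          have hp : ("/status/".toList).isPrefixOf ('/' :: ("status".toList ++ '/' :: rest)) = true := by
            rw [List.isPrefixOf_iff_prefix]
            exact List.prefix_append _ _
          rw [hp]
          simp
        rw [hfind]
        simp only [if_neg (by norm_num : (0 : Int) ≠ -1), Int.toNat_zero, Nat.zero_add]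
        have hdrop : ("status".toList ++ '/' :: rest).drop 7 = rest := rfl
        rw [hdrop, hq]
        have hunf : pvLoopA ("status".toList :: q :: qs)
            = if "status".toList = "status".toList then some ((PySem.Chars.splitOn q ['?']).headI)
              else pvLoopA (q :: qs) := rfl
        rw [hunf, if_pos rfl, pvSplitOn_single '/' rest, hq]
        rfl
      · -- seg is not "status": skip past it
        have hnp := pvNotPrefix seg rest hfree' hseg
        have hstep : PySem.Chars.find ('/' :: (seg ++ '/' :: rest)) "/status/".toList
            = PySem.Chars.find.go "/status/".toList (seg ++ '/' :: rest) 1 := by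
          rw [PySem.Chars.find, PySem.Chars.find.go]
          have hp : ("/status/".toList).isPrefixOf ('/' :: (seg ++ '/' :: rest)) = false := by
            rw [Bool.eq_false_iff]
            intro habs
            have hpre := List.isPrefixOf_iff_prefix.mp habs
            have hpre2 : "status/".toList <+: seg ++ '/' :: rest := by
              have h8 : ("/status/".toList) = '/' :: "status/".toList := by decide
              rw [h8] at hpre
              exact (List.cons_prefix_cons.mp hpre).2
            exact hnp hpre2
          rw [hp]
          simp
        set g := PySem.Chars.find ('/' :: rest) "/status/".toList with hg_def
        have hge : -1 ≤ g := hg_def ▸ PySem.Chars.neg_one_le_find ('/' :: rest) "/status/".toList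
        have hfind_t : PySem.Chars.find ('/' :: (seg ++ '/' :: rest)) "/status/".toList
            = (if g = -1 then (-1 : Int) else ((1 + seg.length : Nat) : Int) + g) := by
          rw [hstep, pvFindGo_skip seg rest 1 hfree', pvFindGo_offset, ← PySem.Chars.find, ← hg_def]
        have hloopA : pvLoopA (seg :: q :: qs) = pvLoopA (q :: qs) := by
          have hunf : pvLoopA (seg :: q :: qs)
              = if seg = "status".toList then some ((PySem.Chars.splitOn q ['?']).headI)
                else pvLoopA (q :: qs) := rfl
          rw [hunf, if_neg hseg]
        rw [hq, hloopA, ← hq, ih rest hlen, ← hg_def]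
        by_cases hfr : g = -1
        · rw [if_pos hfr, hfind_t, if_pos hfr]
          simp
        · have hne : ((1 + seg.length : Nat) : Int) + g ≠ -1 := by
            push_cast
            omega
          rw [if_neg hfr, hfind_t, if_neg hfr, if_neg hne]
          congr 2
          have htn : (((1 + seg.length : Nat) : Int) + g).toNat + 7
              = (seg.length + 1) + (g.toNat + 7) := by
            push_cast
            omega
          rw [htn, List.drop_append, List.drop_eq_nil_of_le (as := seg) (by omega)]
          have h2 : (seg.length + 1) + (g.toNat + 7) - seg.length = (g.toNat + 7) + 1 := by omega
          rw [h2, List.nil_append, List.drop_succ_cons]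
    · -- no '/' in t at all
      have hsingle : List.splitOnP (fun x => x == '/') t = [t] :=
        List.splitOnP_eq_single _ _ (by
          intro x hx
          simp
          intro h; exact hc (h ▸ hx))
      rw [hsingle]
      have hfind : PySem.Chars.find ('/' :: t) "/status/".toList = -1 := by
        rw [PySem.Chars.find, PySem.Chars.find.go]
        have hp : ("/status/".toList).isPrefixOf ('/' :: t) = false := by
          rw [Bool.eq_false_iff]
          intro habs
          have hpre := List.isPrefixOf_iff_prefix.mp habs
          have h8 : ("/status/".toList) = '/' :: "status/".toList := by decide
          rw [h8] at hpre
          have := (List.cons_prefix_cons.mp hpre).2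
          exact hc (this.subset (by decide))
        simp only [hp, Bool.false_eq_true, if_false]
        exact pvFindGo_nofree t 1 hc
      rw [hfind]
      simp [pvLoopA]

-- ===== VERDICT (by name: the statement is the Claim_ definition above) =====
theorem extract_tweet_id_spec : Claim_equal_extract_tweet_id := by
  intro u _ hpre
  unfold Spec_extract_tweet_id extract_tweet_id extract_tweet_id_alt
  by_cases hurl : (PySem.Str.isIn "twitter.com" u || PySem.Str.isIn "x.com" u) = true
  · rw [if_pos hurl, if_pos hurl]
    have hfind_ne : PySem.Chars.find ('/' :: pvRstripSlash u.toList) "/status/".toList ≠ -1 := by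
      rcases hpre with h | h
      · rw [hurl] at h
        cases h
      · rw [PySem.Chars.isIn] at h
        simpa using h
    have hge : 0 ≤ PySem.Chars.find ('/' :: pvRstripSlash u.toList) "/status/".toList := by
      have := PySem.Chars.neg_one_le_find ('/' :: pvRstripSlash u.toList) "/status/".toList
      omega
    have hmain := pvMain (pvRstripSlash u.toList).length (pvRstripSlash u.toList) le_rfl
    rw [← pvSplitOn_single '/' (pvRstripSlash u.toList)] at hmain
    simp only []
    rw [hmain, if_neg hfind_ne, if_neg hfind_ne]
    have h0 : (0 : Int) ≤ PySem.Chars.find ('/' :: pvRstripSlash u.toList) "/status/".toList + 7 := by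
      omega
    have hslice := PySem.List.slice_from (pvRstripSlash u.toList) h0
    have htn : (PySem.Chars.find ('/' :: pvRstripSlash u.toList) "/status/".toList + 7).toNat
        = (PySem.Chars.find ('/' :: pvRstripSlash u.toList) "/status/".toList).toNat + 7 := by
      omega
    rw [htn] at hslice
    rw [PySem.Chars.slice_eq_listSlice, hslice]
  · rw [if_neg hurl, if_neg hurl]
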